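-- pv_equiv track=rewrite | github.com/invisiblemonsters/math-lab | coffinhead/sat_engine.py | ordering_backbone_first
-- ===== SOURCE A (Python) =====
-- from collections import Counter, defaultdict
--
-- def find_backbones_bruteforce(clauses: list[list[int]], n_vars: int) -> dict[int, bool]:
--     """
--     Find backbone variables by brute-force: enumerate all solutions,
--     check which variables are fixed across ALL of them.
--     Only feasible for small instances (n <= 15 or so).
--     """
--     solutions = []
--
--     def enumerate_solutions(assignment, var_idx):
--         if var_idx > n_vars:
--             # Check if all clauses satisfied
--             for clause in clauses:
--                 satisfied = False
--                 for lit in clause: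
--                     v = abs(lit)
--                     val = assignment.get(v, True)
--                     if (lit > 0 and val) or (lit < 0 and not val):
--                         satisfied = True
--                         break
--                 if not satisfied:
--                     return
--             solutions.append(dict(assignment))
--             return
--
--         assignment[var_idx] = True
--         enumerate_solutions(assignment, var_idx + 1)
--         assignment[var_idx] = False
--         enumerate_solutions(assignment, var_idx + 1)
--         del assignment[var_idx]
--
--     enumerate_solutions({}, 1)
--
--     if not solutions:
--         return {}
--
--     backbones = {}
--     for v in range(1, n_vars + 1):
--         values = set(sol[v] for sol in solutions)
--         if len(values) == 1:
--             backbones[v] = next(iter(values))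
--
--     return backbones
--
-- def ordering_backbone_first(clauses: list[list[int]], n_vars: int) -> list[int]:
--     """
--     Backbone-first ordering: put backbone variables at the front.
--     Remaining variables sorted by frequency.
--     """
--     backbones = find_backbones_bruteforce(clauses, n_vars)
--     backbone_vars = list(backbones.keys())
--     non_backbone = [v for v in range(1, n_vars + 1) if v not in backbones]
--
--     # Sort non-backbone by frequency
--     counts = Counter()
--     for clause in clauses:
--         for lit in clause:
--             counts[abs(lit)] += 1
--     non_backbone.sort(key=lambda v: counts.get(v, 0))
--
--     return backbone_vars + non_backbone
-- ===== SOURCE B (Python) =====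
-- from collections import Counter
-- from itertools import product
--
-- def ordering_backbone_first(clauses: list[list[int]], n_vars: int) -> list[int]:
--     """
--     Backbone-first ordering: enumerate all assignments iteratively and keep,
--     per variable, the set of values it takes over the satisfying ones; a
--     variable is a backbone iff that set is a singleton.  Non-backbone
--     variables follow, sorted by how often they occur in the clauses.
--     """
--     n = max(n_vars, 0)
--     seen = {v: set() for v in range(1, n + 1)}
--     for bits in product([True, False], repeat=n):
--         assignment = {i + 1: b for i, b in enumerate(bits)}
--         if all(any((lit > 0) == assignment.get(abs(lit), True) for lit in clause)
--                for clause in clauses):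
--             for i, b in enumerate(bits):
--                 seen[i + 1].add(b)
--     backbone = [v for v in range(1, n + 1) if len(seen[v]) == 1]
--     counts = Counter(abs(lit) for clause in clauses for lit in clause)
--     rest = sorted((v for v in range(1, n + 1) if len(seen[v]) != 1),
--                   key=lambda v: counts[v])
--     return backbone + rest
-- ===== Notes on version B (the rewrite author's own statement) =====
-- stated objective: alternative
-- what changed: Replaces the recursive backtracking enumeration that stores a dict copy of every satisfying assignment and then rescans the whole solution list once per variable by a single iterative pass over itertools.product assignments that maintains one seen-value set per variable; backbones are the variables whose set ends up a singleton.
import Mathlib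
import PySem

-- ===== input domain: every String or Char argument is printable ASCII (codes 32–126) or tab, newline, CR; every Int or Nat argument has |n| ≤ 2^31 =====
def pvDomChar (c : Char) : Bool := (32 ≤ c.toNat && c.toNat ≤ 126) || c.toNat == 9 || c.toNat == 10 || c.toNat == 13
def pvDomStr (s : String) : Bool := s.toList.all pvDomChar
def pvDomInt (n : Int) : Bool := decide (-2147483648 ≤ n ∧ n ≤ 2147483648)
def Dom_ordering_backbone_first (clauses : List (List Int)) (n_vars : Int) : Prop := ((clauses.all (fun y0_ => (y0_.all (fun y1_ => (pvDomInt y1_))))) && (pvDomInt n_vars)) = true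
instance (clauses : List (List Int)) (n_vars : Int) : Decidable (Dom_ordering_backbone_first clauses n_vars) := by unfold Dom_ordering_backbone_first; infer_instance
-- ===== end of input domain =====

-- B replaces A's recursive solution enumeration (which stores every satisfying assignment and
-- then scans them once per variable) by one iterative pass over the assignment product that
-- maintains a per-variable set of seen values; same return value, different decomposition.


-- ===== PORT A =====

-- the clause-satisfaction check at the recursion's leaf (the inner two loops with break/return)
def pvSatA (clauses : List (List Int)) (assignment : PySem.Dict Int Bool) : Bool :=
  clauses.all (fun clause => clause.any (fun lit =>
    let v : Int := |lit|
    let val : Bool := (assignment.get? v).getD true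
    (decide (lit > 0) && val) || (decide (lit < 0) && !val)))

-- enumerate_solutions: the Python mutates one dict and snapshots copies at the leaves;
-- functionally each call inserts the fresh key var_idx (True branch, then False), exact here.
def pvEnumA (clauses : List (List Int)) (n_vars : Int)
    (assignment : PySem.Dict Int Bool) (var_idx : Int) : List (PySem.Dict Int Bool) :=
  if var_idx > n_vars then
    (if pvSatA clauses assignment then [assignment] else [])
  else
    pvEnumA clauses n_vars (assignment.insert var_idx true) (var_idx + 1) ++
    pvEnumA clauses n_vars (assignment.insert var_idx false) (var_idx + 1)
termination_by (n_vars + 1 - var_idx).toNat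
decreasing_by all_goals omega

def pvFindBackbones (clauses : List (List Int)) (n_vars : Int) : PySem.Dict Int Bool :=
  let solutions := pvEnumA clauses n_vars PySem.Dict.empty 1
  if solutions = [] then PySem.Dict.empty
  else
    (PySem.List.pyRange 1 (n_vars + 1) 1).foldl (fun backbones v =>
      let values : PySem.Set Bool :=
        PySem.Set.ofList (solutions.map (fun sol => (sol.get? v).getD true))
      -- sol[v] never raises here (every solution holds keys 1..n_vars); next(iter(values))
      -- is headD on the nonempty set
      if values.length == 1 then backbones.insert v (values.headD true) else backbones)
      PySem.Dict.empty

def ordering_backbone_first (clauses : List (List Int)) (n_vars : Int) : List Int :=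
  let backbones := pvFindBackbones clauses n_vars
  let backbone_vars := backbones.keys
  let non_backbone := (PySem.List.pyRange 1 (n_vars + 1) 1).filter (fun v => !(backbones.contains v))
  let counts : PySem.Dict Int Int :=
    clauses.foldl (fun c clause =>
      clause.foldl (fun c lit => c.modify |lit| 0 (· + 1)) c) PySem.Dict.empty
  backbone_vars ++ PySem.List.sorted non_backbone (fun v => counts.getD v 0) false

-- ===== PORT B =====

-- itertools.product([True, False], repeat=n): the first coordinate varies slowest
def pvProd : Nat → List (List Bool)
  | 0 => [[]]
  | k + 1 => ((pvProd k).map (true :: ·)) ++ ((pvProd k).map (false :: ·))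

-- assignment = {i + 1: b for i, b in enumerate(bits)}
def pvAssign (bits : List Bool) : PySem.Dict Int Bool :=
  (PySem.List.enumerate bits).foldl (fun d p => d.insert (p.1 + 1) p.2) PySem.Dict.empty

-- all(any((lit > 0) == assignment.get(abs(lit), True) for lit in clause) for clause in clauses)
def pvSatB (clauses : List (List Int)) (assignment : PySem.Dict Int Bool) : Bool :=
  clauses.all (fun clause => clause.any (fun lit =>
    decide (lit > 0) == ((assignment.get? |lit|).getD true)))

-- for i, b in enumerate(bits): seen[i + 1].add(b)
-- (the key i + 1 is always present in seen, so Dict.modify's default [] is never used)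
def pvSeenStep (seen : PySem.Dict Int (PySem.Set Bool)) (bits : List Bool) :
    PySem.Dict Int (PySem.Set Bool) :=
  (PySem.List.enumerate bits).foldl
    (fun s p => s.modify (p.1 + 1) [] (fun st => PySem.Set.add st p.2)) seen

def ordering_backbone_first_alt (clauses : List (List Int)) (n_vars : Int) : List Int :=
  let n : Nat := (max n_vars 0).toNat
  let seen0 : PySem.Dict Int (PySem.Set Bool) :=
    (PySem.List.pyRange 1 ((n : Int) + 1) 1).foldl
      (fun d v => d.insert v ([] : PySem.Set Bool)) PySem.Dict.empty
  let seen := (pvProd n).foldl (fun seen bits =>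
      if pvSatB clauses (pvAssign bits) then pvSeenStep seen bits else seen) seen0
  -- seen[v]: v ∈ 1..n is always a key, so getD's default is never used
  let backbone := (PySem.List.pyRange 1 ((n : Int) + 1) 1).filter
      (fun v => (seen.getD v []).length == 1)
  let counts : PySem.Dict Int Int :=
    PySem.Dict.counter (clauses.flatMap (fun clause => clause.map (fun lit => |lit|)))
  let rest := PySem.List.sorted
      ((PySem.List.pyRange 1 ((n : Int) + 1) 1).filter
        (fun v => !((seen.getD v []).length == 1)))
      (fun v => counts.getD v 0) false
  backbone ++ rest

-- ===== PRECONDITION & SPEC =====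
def Spec_ordering_backbone_first (clauses : List (List Int)) (n_vars : Int) (out : List Int) : Prop := out = ordering_backbone_first_alt clauses n_vars
instance (clauses : List (List Int)) (n_vars : Int) (out : List Int) : Decidable (Spec_ordering_backbone_first clauses n_vars out) := by unfold Spec_ordering_backbone_first; infer_instance

-- ===== CLAIM (what is proved, stated in full; the proofs are below) =====
def Claim_equal_ordering_backbone_first : Prop := ∀ (clauses : List (List Int)) (n_vars : Int), Dom_ordering_backbone_first clauses n_vars → Spec_ordering_backbone_first clauses n_vars (ordering_backbone_first clauses n_vars)

-- ===== LEMMAS AND PROOFS =====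

-- Proof-side model: a leaf assignment of A is the empty dict extended along a boolean vector.
def pvExts (d : PySem.Dict Int Bool) (i : Int) : List Bool → PySem.Dict Int Bool
  | [] => d
  | b :: bs => pvExts (d.insert i b) (i + 1) bs

def pvSolsA (clauses : List (List Int)) (n_vars : Int) : List (PySem.Dict Int Bool) :=
  (((pvProd n_vars.toNat).map (pvExts PySem.Dict.empty 1)).filter (pvSatA clauses))

theorem mem_pvProd (k : Nat) (bs : List Bool) : bs ∈ pvProd k ↔ bs.length = k := by
  induction k generalizing bs with
  | zero => simp [pvProd, List.length_eq_zero_iff]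
  | succ k ih =>
    cases bs with
    | nil => simp [pvProd, ih]
    | cons b t => cases b <;> simp [pvProd, ih]

theorem get_pvExts (bs : List Bool) : ∀ (d : PySem.Dict Int Bool) (i v : Int),
    (pvExts d i bs).get? v =
      if i ≤ v ∧ v < i + bs.length then some (bs.getD (v - i).toNat false) else d.get? v := by
  induction bs with
  | nil =>
    intro d i v
    rw [pvExts, if_neg (by simp)]
  | cons b t ih =>
    intro d i v
    rw [pvExts, ih]
    rw [PySem.Dict.get?_insert]
    simp only [List.length_cons]
    by_cases h1 : i + 1 ≤ v ∧ v < i + 1 + t.length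
    · have hv : (v - i).toNat = (v - (i+1)).toNat + 1 := by omega
      rw [if_pos h1, hv, List.getD_cons_succ,
        if_pos (by constructor <;> [omega; (push_cast; omega)])]
    · rw [if_neg h1]
      by_cases h2 : v = i
      · have hv : (v - i).toNat = 0 := by omega
        rw [if_pos h2, hv, List.getD_cons_zero,
          if_pos (by constructor <;> [omega; (push_cast at h1 ⊢; omega)])]
      · rw [if_neg h2, if_neg (by push_cast at h1 ⊢; omega)]

theorem enum_eq (clauses : List (List Int)) (n_vars : Int) :
    ∀ (k : Nat) (i : Int) (d : PySem.Dict Int Bool), (n_vars + 1 - i).toNat = k →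
      pvEnumA clauses n_vars d i = ((pvProd k).map (pvExts d i)).filter (pvSatA clauses) := by
  intro k
  induction k with
  | zero =>
    intro i d hk
    rw [pvEnumA, if_pos (by omega)]
    cases hs : pvSatA clauses d <;> simp [pvProd, pvExts, List.filter, hs]
  | succ k ih =>
    intro i d hk
    rw [pvEnumA, if_neg (by omega)]
    rw [ih (i+1) (d.insert i true) (by omega), ih (i+1) (d.insert i false) (by omega)]
    simp [pvProd, List.filter_append, List.map_map, Function.comp_def, pvExts]

theorem solsA_eq (clauses : List (List Int)) (n_vars : Int) :
    pvEnumA clauses n_vars PySem.Dict.empty 1 = pvSolsA clauses n_vars :=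
  enum_eq clauses n_vars n_vars.toNat 1 PySem.Dict.empty (by omega)

-- B's assignment dict is A's leaf dict
theorem assign_fold (bits : List Bool) : ∀ (s : Int) (d : PySem.Dict Int Bool),
    (PySem.List.enumerate bits s).foldl (fun d p => d.insert (p.1 + 1) p.2) d
      = pvExts d (s + 1) bits := by
  induction bits with
  | nil => intro s d; simp [PySem.List.enumerate_nil, pvExts]
  | cons b t ih =>
    intro s d
    rw [PySem.List.enumerate_cons, List.foldl_cons, ih (s + 1)]
    rfl

theorem assign_eq (bits : List Bool) : pvAssign bits = pvExts PySem.Dict.empty 1 bits := by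
  rw [pvAssign, assign_fold bits 0 PySem.Dict.empty, zero_add]

-- B's clause test equals A's on a leaf dict (for lit = 0 both sides are unsatisfied:
-- the dict never holds key 0, so the default True makes them agree)
theorem satB_eq (clauses : List (List Int)) (bs : List Bool) :
    pvSatB clauses (pvExts PySem.Dict.empty 1 bs) = pvSatA clauses (pvExts PySem.Dict.empty 1 bs) := by
  rw [pvSatB, pvSatA]
  congr 1
  funext clause
  congr 1
  funext lit
  simp only
  rcases lt_trichotomy lit 0 with h1 | h1 | h1
  · have : ¬ lit > 0 := by omega
    simp only [decide_eq_true h1, decide_eq_false this]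
    cases hval : ((pvExts PySem.Dict.empty 1 bs).get? |lit|).getD true <;> simp
  · subst h1
    have h0 : ((pvExts PySem.Dict.empty 1 bs).get? 0).getD true = true := by
      rw [get_pvExts, if_neg (by omega), PySem.Dict.get?_empty]
      rfl
    simp [h0]
  · have : ¬ lit < 0 := by omega
    simp only [decide_eq_true h1, decide_eq_false this]
    cases hval : ((pvExts PySem.Dict.empty 1 bs).get? |lit|).getD true <;> simp

-- one pvSeenStep adds bits[v-1] to seen[v] (keys outside 1..len untouched)
theorem seenStep_getD (bits : List Bool) : ∀ (s : Int) (seen : PySem.Dict Int (PySem.Set Bool)) (v : Int),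
    (((PySem.List.enumerate bits s).foldl
        (fun d p => d.modify (p.1 + 1) [] (fun st => PySem.Set.add st p.2)) seen).getD v [])
      = if s + 1 ≤ v ∧ v < s + 1 + bits.length then
          PySem.Set.add (seen.getD v []) (bits.getD (v - (s + 1)).toNat false)
        else seen.getD v [] := by
  induction bits with
  | nil =>
    intro s seen v
    rw [PySem.List.enumerate_nil, List.foldl_nil, if_neg (by simp)]
  | cons b t ih =>
    intro s seen v
    rw [PySem.List.enumerate_cons, List.foldl_cons, ih (s + 1)]
    have hmod := PySem.Dict.getD_modify (d := seen) (k := s + 1) (k' := v) (d0 := ([] : PySem.Set Bool))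
      (f := fun st => PySem.Set.add st b)
    simp only [List.length_cons]
    by_cases h1 : s + 1 + 1 ≤ v ∧ v < s + 1 + 1 + t.length
    · have hv : (v - (s + 1)).toNat = (v - (s + 1 + 1)).toNat + 1 := by omega
      rw [if_pos h1, hmod, if_neg (by omega), hv, List.getD_cons_succ,
        if_pos (by constructor <;> [omega; (push_cast; omega)])]
    · rw [if_neg h1, hmod]
      by_cases h2 : v = s + 1
      · have hv : (v - (s + 1)).toNat = 0 := by omega
        rw [if_pos h2, hv, List.getD_cons_zero,
          if_pos (by constructor <;> [omega; (push_cast at h1 ⊢; omega)]), h2]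
      · rw [if_neg h2, if_neg (by push_cast at h1 ⊢; omega)]

-- the whole seen loop, over a list of equal-length vectors
theorem seen_fold (L : List (List Bool)) (n : Nat) (hL : ∀ bs ∈ L, bs.length = n) :
    ∀ (seen : PySem.Dict Int (PySem.Set Bool)) (v : Int), 1 ≤ v → v ≤ (n : Int) →
      ((L.foldl pvSeenStep seen).getD v [])
        = (L.map (fun bs => bs.getD (v - 1).toNat false)).foldl PySem.Set.add (seen.getD v []) := by
  induction L with
  | nil => intro seen v _ _; rfl
  | cons bs t ih =>
    intro seen v hv1 hv2
    rw [List.foldl_cons, List.map_cons, List.foldl_cons,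
      ih (fun x hx => hL x (by simp [hx])) _ v hv1 hv2]
    congr 1
    rw [pvSeenStep, seenStep_getD bs 0 seen v, hL bs (by simp),
      if_pos (by constructor <;> [omega; (push_cast; omega)])]
    norm_num

theorem seen0_getD (l : List Int) : ∀ (d : PySem.Dict Int (PySem.Set Bool)) (v : Int),
    d.getD v [] = [] →
    ((l.foldl (fun d v => d.insert v ([] : PySem.Set Bool)) d).getD v []) = [] := by
  induction l with
  | nil => intro d v h; exact h
  | cons x t ih =>
    intro d v h
    rw [List.foldl_cons]
    exact ih _ v (by rw [PySem.Dict.getD_insert]; split_ifs <;> simp [h])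

-- the final seen[v] is exactly A's value set for v
theorem seen_getD (clauses : List (List Int)) (n_vars : Int) (v : Int)
    (hv1 : 1 ≤ v) (hv2 : v ≤ n_vars) :
    (((pvProd n_vars.toNat).foldl
        (fun seen bits => if pvSatB clauses (pvAssign bits) then pvSeenStep seen bits else seen)
        ((PySem.List.pyRange 1 ((n_vars.toNat : Int) + 1) 1).foldl
          (fun d v => d.insert v ([] : PySem.Set Bool)) PySem.Dict.empty)).getD v [])
      = PySem.Set.ofList ((pvSolsA clauses n_vars).map (fun sol => (sol.get? v).getD true)) := by
  rw [← List.foldl_filter]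
  have hfc : (pvProd n_vars.toNat).filter (fun bits => pvSatB clauses (pvAssign bits))
      = (pvProd n_vars.toNat).filter (fun bs => pvSatA clauses (pvExts PySem.Dict.empty 1 bs)) :=
    List.filter_congr (fun bs _ => by rw [assign_eq, satB_eq])
  rw [hfc]
  have hlen : ∀ bs ∈ (pvProd n_vars.toNat).filter
      (fun bs => pvSatA clauses (pvExts PySem.Dict.empty 1 bs)), bs.length = n_vars.toNat :=
    fun bs hbs => (mem_pvProd _ bs).mp (List.mem_filter.mp hbs).1
  rw [seen_fold _ n_vars.toNat hlen _ v hv1 (by omega),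
    seen0_getD _ _ v (by rw [PySem.Dict.getD_empty])]
  rw [PySem.Set.ofList_eq_foldl]
  congr 1
  rw [pvSolsA, List.filter_map, List.map_map]
  refine List.map_congr_left (fun bs hbs => ?_)
  have hbl : bs.length = n_vars.toNat := (mem_pvProd _ bs).mp (List.mem_filter.mp hbs).1
  simp only [Function.comp_apply]
  rw [get_pvExts, if_pos (by constructor <;> [omega; (rw [hbl]; push_cast; omega)])]
  rfl

-- keys of A's backbone-building fold
theorem keys_fold (cond : Int → Bool) (g : Int → Bool) : ∀ (l : List Int) (d : PySem.Dict Int Bool),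
    l.Nodup → (∀ v ∈ l, d.contains v = false) →
    (l.foldl (fun bb v => if cond v then bb.insert v (g v) else bb) d).keys
      = d.keys ++ l.filter cond := by
  intro l
  induction l with
  | nil => intro d _ _; simp
  | cons a t ih =>
    intro d hnd hc
    simp only [List.foldl_cons, List.filter_cons]
    by_cases hca : cond a = true
    · rw [if_pos hca, hca, if_pos rfl]
      rw [ih (d.insert a (g a)) (List.Nodup.of_cons hnd) ?_]
      · rw [PySem.Dict.keys_insert_of_not_contains d (g a) (hc a (by simp))]
        simp
      · intro v hv
        rw [PySem.Dict.contains_insert]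
        have hva : v ≠ a := by
          intro h0; subst h0; exact (List.nodup_cons.mp hnd).1 hv
        simp [hva, hc v (by simp [hv])]
    · rw [if_neg hca, if_neg hca,
        ih d (List.Nodup.of_cons hnd) (fun v hv => hc v (by simp [hv]))]

theorem counts_eq (clauses : List (List Int)) :
    clauses.foldl (fun c clause =>
        clause.foldl (fun c lit => c.modify |lit| 0 (· + 1)) c) PySem.Dict.empty
      = PySem.Dict.counter (clauses.flatMap (fun clause => clause.map (fun lit => |lit|))) := by
  rw [PySem.Dict.counter_eq_foldl, List.foldl_flatMap]
  congr 1
  funext c clause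
  rw [List.foldl_map]

-- the two ranges coincide (both empty when n_vars < 0)
theorem range_eq (n_vars : Int) :
    PySem.List.pyRange 1 (((max n_vars 0).toNat : Int) + 1) 1
      = PySem.List.pyRange 1 (n_vars + 1) 1 := by
  by_cases h : 0 ≤ n_vars
  · rw [show ((max n_vars 0).toNat : Int) = n_vars from by omega]
  · rw [PySem.List.pyRange_one_eq_nil (by omega), PySem.List.pyRange_one_eq_nil (by omega)]

theorem ports_agree (clauses : List (List Int)) (n_vars : Int) :
    ordering_backbone_first clauses n_vars = ordering_backbone_first_alt clauses n_vars := by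
  have hmax : (max n_vars 0).toNat = n_vars.toNat := by omega
  have hrange2 : PySem.List.pyRange 1 ((n_vars.toNat : Int) + 1) 1
      = PySem.List.pyRange 1 (n_vars + 1) 1 := by
    have h := range_eq n_vars; rwa [hmax] at h
  simp only [ordering_backbone_first, ordering_backbone_first_alt, pvFindBackbones,
    solsA_eq, counts_eq, hmax, hrange2]
  -- B's filter condition equals A's per-variable condition on the range
  have hB : ∀ v ∈ PySem.List.pyRange 1 (n_vars + 1) 1,
      (((((pvProd n_vars.toNat).foldl
          (fun seen bits => if pvSatB clauses (pvAssign bits) then pvSeenStep seen bits else seen)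
          ((PySem.List.pyRange 1 (n_vars + 1) 1).foldl
            (fun d v => d.insert v ([] : PySem.Set Bool)) PySem.Dict.empty)).getD v []).length == 1))
        = ((PySem.Set.ofList ((pvSolsA clauses n_vars).map
            (fun sol => (sol.get? v).getD true))).length == 1) := by
    intro v hv
    rw [PySem.List.mem_pyRange_one] at hv
    rw [← hrange2, seen_getD clauses n_vars v (by omega) (by omega)]
  by_cases hS : pvSolsA clauses n_vars = []
  · have hcond : ∀ v, ((PySem.Set.ofList ((pvSolsA clauses n_vars).map
        (fun sol => (sol.get? v).getD true))).length == 1) = false := by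
      intro v; rw [hS]; rfl
    rw [if_pos hS, PySem.Dict.keys_empty, List.nil_append]
    rw [show ((PySem.List.pyRange 1 (n_vars + 1) 1).filter
        (fun v => ((((pvProd n_vars.toNat).foldl
          (fun seen bits => if pvSatB clauses (pvAssign bits) then pvSeenStep seen bits else seen)
          ((PySem.List.pyRange 1 (n_vars + 1) 1).foldl
            (fun d v => d.insert v ([] : PySem.Set Bool)) PySem.Dict.empty)).getD v []).length == 1)))
        = [] from by
      rw [List.filter_eq_nil_iff]
      intro v hv
      rw [hB v hv, hcond v]
      simp]
    rw [List.nil_append]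
    congr 1
    apply List.filter_congr
    intro v hv
    rw [PySem.Dict.contains_empty, hB v hv, hcond v]
  · rw [if_neg hS]
    have hkeys := keys_fold
      (fun v => ((PySem.Set.ofList ((pvSolsA clauses n_vars).map
        (fun sol => (sol.get? v).getD true))).length == 1))
      (fun v => (PySem.Set.ofList ((pvSolsA clauses n_vars).map
        (fun sol => (sol.get? v).getD true))).headD true)
      (PySem.List.pyRange 1 (n_vars + 1) 1) PySem.Dict.empty
      (PySem.List.nodup_pyRange_one 1 (n_vars + 1))
      (fun v _ => PySem.Dict.contains_empty v)
    rw [PySem.Dict.keys_empty, List.nil_append] at hkeys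
    rw [hkeys]
    congr 1
    · exact List.filter_congr (fun v hv => (hB v hv).symm)
    · congr 1
      apply List.filter_congr
      intro v hv
      rw [PySem.Dict.contains_eq_decide_mem_keys, hkeys, hB v hv]
      simp only [List.mem_filter, hv, true_and]
      cases h : ((PySem.Set.ofList ((pvSolsA clauses n_vars).map
        (fun sol => (sol.get? v).getD true))).length == 1) <;> simp

-- ===== VERDICT (by name: the statement is the Claim_ definition above) =====
theorem ordering_backbone_first_spec : Claim_equal_ordering_backbone_first := by
  intro clauses n_vars _
  unfold Spec_ordering_backbone_first
  exact ports_agree clauses n_vars
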